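-- pv_equiv track=rewrite | github.com/tvanfossen/doxygen-guard | src/doxygen_guard/parser.py | find_body_end_indent
-- ===== SOURCE A (Python) =====
-- def find_body_end_indent(lines: list[str], start_line: int) -> int:
--     def_indent = len(lines[start_line]) - len(lines[start_line].lstrip())
--     body_start = _find_body_start(lines, start_line)
--     body_indent = None
--     last_body_line = body_start
--
--     for i in range(body_start + 1, len(lines)):
--         stripped = lines[i].strip()
--         if not stripped:
--             continue
--
--         current_indent = len(lines[i]) - len(lines[i].lstrip())
--
--         if body_indent is None:
--             if current_indent > def_indent:
--                 body_indent = current_indent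
--                 last_body_line = i
--             else:
--                 return body_start
--         elif current_indent >= body_indent:
--             last_body_line = i
--         else:
--             break
--
--     return last_body_line
--
-- def _find_body_start(lines: list[str], start_line: int) -> int:
--     paren_depth = 0
--     for i in range(start_line, len(lines)):
--         for ch in lines[i]:
--             if ch == "(":
--                 paren_depth += 1
--             elif ch == ")":
--                 paren_depth -= 1
--         if paren_depth == 0 and ":" in lines[i]:
--             return i
--     return start_line
-- ===== SOURCE B (Python) =====
-- def find_body_end_indent(lines: list[str], start_line: int) -> int:
--     def_indent = _indent(lines[start_line])
--     body_start = _find_body_start(lines, start_line)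
--     # materialize the non-blank body lines once, as (index, indent) pairs
--     body = [(i, _indent(lines[i]))
--             for i in range(body_start + 1, len(lines))
--             if lines[i].strip()]
--     if not body or body[0][1] <= def_indent:
--         return body_start
--     body_indent = body[0][1]
--     # the answer is the entry just before the first dedented entry
--     k = next((j for j, (_, ind) in enumerate(body) if ind < body_indent),
--              len(body))
--     return body[k - 1][0]
--
--
-- def _find_body_start(lines: list[str], start_line: int) -> int:
--     depth = 0
--     for i in range(start_line, len(lines)):
--         depth += sum(1 if c == "(" else -1 if c == ")" else 0 for c in lines[i])
--         if depth == 0 and ":" in lines[i]: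
--             return i
--     return start_line
--
--
-- def _indent(line: str) -> int:
--     return len(line) - len(line.lstrip())
-- ===== Notes on version B (the rewrite author's own statement) =====
-- stated objective: alternative
-- what changed: Instead of A's one stateful scan with a body_indent sentinel and blank-skipping, B materializes the (index, indent) pairs of the non-blank body lines once, decides the degenerate cases on that list's head, and returns the entry positioned just before the first dedented entry (found with next/enumerate) - no accumulator loop at all; the paren-depth helper sums per-line deltas instead of a char-by-char if/elif.
import Mathlib
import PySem

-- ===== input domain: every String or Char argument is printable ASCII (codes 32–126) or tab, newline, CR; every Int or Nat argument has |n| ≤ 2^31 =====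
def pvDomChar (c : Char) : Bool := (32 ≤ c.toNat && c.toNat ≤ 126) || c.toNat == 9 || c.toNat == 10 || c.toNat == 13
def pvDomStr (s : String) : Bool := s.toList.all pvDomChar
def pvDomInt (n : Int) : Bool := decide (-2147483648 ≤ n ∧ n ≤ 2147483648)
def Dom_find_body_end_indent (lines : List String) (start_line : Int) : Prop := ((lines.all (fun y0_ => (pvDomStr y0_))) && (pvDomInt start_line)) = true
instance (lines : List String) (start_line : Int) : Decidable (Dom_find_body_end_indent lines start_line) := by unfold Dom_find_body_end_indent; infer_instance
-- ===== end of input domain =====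

-- B replaces A's stateful sentinel scan by a materialized list of (index, indent) pairs of the
-- non-blank body lines plus a positional computation (element before the first dedented entry);
-- same cost, return value proved equal on all inputs where A does not raise.

-- ===== PORT A =====
-- per-character paren-depth loop of A's _find_body_start
def pvCharDepthA (d : Int) (cs : List Char) : Int :=
  cs.foldl (fun d ch => if ch = '(' then d + 1 else if ch = ')' then d - 1 else d) d

-- the 'for i in range(start_line, len(lines))' loop of A's _find_body_start
def pvFbsA (lines : List String) (start_line : Int) : List Int → Int → Int
  | [], _ => start_line
  | i :: rest, depth =>
      let line := PySem.List.pyGetD lines i ""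
      let depth := pvCharDepthA depth line.toList
      if depth == 0 && PySem.Str.isIn ":" line then i
      else pvFbsA lines start_line rest depth

-- A's main 'for i in range(body_start + 1, len(lines))' loop with its body_indent sentinel
def pvLoopA (lines : List String) (def_indent body_start : Int) :
    List Int → Option Int → Int → Int
  | [], _, last => last
  | i :: rest, bi, last =>
      let line := PySem.List.pyGetD lines i ""
      if PySem.Str.strip line == "" then pvLoopA lines def_indent body_start rest bi last
      else
        let cur := PySem.Str.len line - PySem.Str.len (PySem.Str.lstrip line)
        match bi with
        | none => if def_indent < cur then pvLoopA lines def_indent body_start rest (some cur) i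
                  else body_start
        | some b => if b ≤ cur then pvLoopA lines def_indent body_start rest (some b) i
                    else last

def find_body_end_indent (lines : List String) (start_line : Int) : Int :=
  let hdr := PySem.List.pyGetD lines start_line ""
  let def_indent := PySem.Str.len hdr - PySem.Str.len (PySem.Str.lstrip hdr)
  let body_start := pvFbsA lines start_line (PySem.List.pyRange start_line (lines.length : Int) 1) 0
  pvLoopA lines def_indent body_start
    (PySem.List.pyRange (body_start + 1) (lines.length : Int) 1) none body_start

-- ===== PORT B =====
def pvIndent (line : String) : Int :=
  PySem.Str.len line - PySem.Str.len (PySem.Str.lstrip line)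

-- per-line paren delta of B's _find_body_start (the sum(...) generator)
def pvLineDelta (cs : List Char) : Int :=
  (cs.map (fun c => if c = '(' then (1 : Int) else if c = ')' then -1 else 0)).sum

def pvFbsB (lines : List String) (start_line : Int) : List Int → Int → Int
  | [], _ => start_line
  | i :: rest, depth =>
      let line := PySem.List.pyGetD lines i ""
      let depth := depth + pvLineDelta line.toList
      if depth == 0 && PySem.Str.isIn ":" line then i
      else pvFbsB lines start_line rest depth

def find_body_end_indent_alt (lines : List String) (start_line : Int) : Int :=
  let def_indent := pvIndent (PySem.List.pyGetD lines start_line "")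
  let body_start := pvFbsB lines start_line (PySem.List.pyRange start_line (lines.length : Int) 1) 0
  -- the comprehension '[(i, _indent(lines[i])) for i in range(...) if lines[i].strip()]'
  let body := ((PySem.List.pyRange (body_start + 1) (lines.length : Int) 1).filter
      (fun i => !(PySem.Str.strip (PySem.List.pyGetD lines i "") == ""))).map
      (fun i => (i, pvIndent (PySem.List.pyGetD lines i "")))
  match body with
  | [] => body_start                                   -- 'if not body … return body_start'
  | (_, d0) :: _ =>
      if d0 ≤ def_indent then body_start               -- '… or body[0][1] <= def_indent'
      else
        -- 'next((j for j,(_,ind) in enumerate(body) if ind < body_indent), len(body))'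
        let k : Int := (body.findIdx (fun p => decide (p.2 < d0)) : Nat)
        -- 'body[k - 1][0]'; k ≥ 1 always holds here, so the index is in range and the
        -- default of pyGetD is never used
        (PySem.List.pyGetD body (k - 1) (0, 0)).1

-- ===== PRECONDITION & SPEC =====
-- Pre_ excludes only the inputs on which A raises IndexError (lines[start_line] out of range).
def Pre_find_body_end_indent (lines : List String) (start_line : Int) : Prop :=
  PySem.Raise.InRange lines.length start_line
instance (lines : List String) (start_line : Int) : Decidable (Pre_find_body_end_indent lines start_line) := by unfold Pre_find_body_end_indent; infer_instance

def pvWitness_find_body_end_indent : List String × Int :=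
  (["def f():", "    return 1"], 0)

def Spec_find_body_end_indent (lines : List String) (start_line : Int) (out : Int) : Prop := out = find_body_end_indent_alt lines start_line
instance (lines : List String) (start_line : Int) (out : Int) : Decidable (Spec_find_body_end_indent lines start_line out) := by unfold Spec_find_body_end_indent; infer_instance

-- ===== CLAIM (what is proved, stated in full; the proofs are below) =====
def Claim_equal_find_body_end_indent : Prop := ∀ (lines : List String) (start_line : Int), Dom_find_body_end_indent lines start_line → Pre_find_body_end_indent lines start_line → Spec_find_body_end_indent lines start_line (find_body_end_indent lines start_line)

-- ===== LEMMAS AND PROOFS =====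

theorem pvCharDepthA_eq_delta (cs : List Char) (d : Int) :
    pvCharDepthA d cs = d + pvLineDelta cs := by
  induction cs generalizing d with
  | nil => simp [pvCharDepthA, pvLineDelta]
  | cons c cs ih =>
      simp only [pvCharDepthA, List.foldl_cons, pvLineDelta, List.map_cons, List.sum_cons] at *
      rw [ih]
      split_ifs <;> ring

theorem pvFbsA_eq_pvFbsB (lines : List String) (start_line : Int) (l : List Int) (d : Int) :
    pvFbsA lines start_line l d = pvFbsB lines start_line l d := by
  induction l generalizing d with
  | nil => rfl
  | cons i rest ih =>
      simp only [pvFbsA, pvFbsB, pvCharDepthA_eq_delta]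
      split <;> simp [ih]

-- proof-only reading of A's some-state loop, on the filtered (index, indent) list
def pvTail (b : Int) : Int → List (Int × Int) → Int
  | last, [] => last
  | last, (j, d) :: rest => if d < b then last else pvTail b j rest

-- the (index, indent) pairs of the non-blank lines among the indices l
def pvNB (lines : List String) (l : List Int) : List (Int × Int) :=
  (l.filter (fun i => !(PySem.Str.strip (PySem.List.pyGetD lines i "") == ""))).map
    (fun i => (i, pvIndent (PySem.List.pyGetD lines i "")))

theorem pvNB_cons_blank (lines : List String) (j : Int) (rest : List Int)
    (h : (PySem.Str.strip (PySem.List.pyGetD lines j "") == "") = true) :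
    pvNB lines (j :: rest) = pvNB lines rest := by
  simp only [pvNB, List.filter_cons, h, Bool.not_true]
  rfl

theorem pvNB_cons_nonblank (lines : List String) (j : Int) (rest : List Int)
    (h : (PySem.Str.strip (PySem.List.pyGetD lines j "") == "") = false) :
    pvNB lines (j :: rest)
      = (j, pvIndent (PySem.List.pyGetD lines j "")) :: pvNB lines rest := by
  simp only [pvNB, List.filter_cons, h, Bool.not_false]
  rfl

theorem pvLoopA_some (lines : List String) (def_indent body_start b : Int)
    (l : List Int) (last : Int) :
    pvLoopA lines def_indent body_start l (some b) last = pvTail b last (pvNB lines l) := by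
  induction l generalizing last with
  | nil => rfl
  | cons j rest ih =>
      by_cases h : (PySem.Str.strip (PySem.List.pyGetD lines j "") == "") = true
      · rw [pvNB_cons_blank lines j rest h]
        simp only [pvLoopA, h, if_true]
        exact ih last
      · rw [pvNB_cons_nonblank lines j rest (by simpa using h)]
        simp only [pvLoopA, h, pvTail, pvIndent]
        by_cases h2 : b ≤ PySem.Str.len (PySem.List.pyGetD lines j "")
            - PySem.Str.len (PySem.Str.lstrip (PySem.List.pyGetD lines j ""))
        · rw [if_pos h2, if_neg (show ¬(PySem.Str.len (PySem.List.pyGetD lines j "")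
            - PySem.Str.len (PySem.Str.lstrip (PySem.List.pyGetD lines j "")) < b) from by omega)]
          exact ih j
        · rw [if_neg h2, if_pos (show PySem.Str.len (PySem.List.pyGetD lines j "")
            - PySem.Str.len (PySem.Str.lstrip (PySem.List.pyGetD lines j "")) < b from by omega)]
          simp

theorem pvLoopA_none (lines : List String) (def_indent body_start : Int) (l : List Int) :
    pvLoopA lines def_indent body_start l none body_start =
      match pvNB lines l with
      | [] => body_start
      | (i0, d0) :: rest =>
          if d0 ≤ def_indent then body_start else pvTail d0 i0 rest := by
  induction l with
  | nil => rfl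
  | cons i rest ih =>
      by_cases h : (PySem.Str.strip (PySem.List.pyGetD lines i "") == "") = true
      · rw [pvNB_cons_blank lines i rest h]
        simp only [pvLoopA, h, if_true]
        exact ih
      · rw [pvNB_cons_nonblank lines i rest (by simpa using h)]
        simp only [pvLoopA, h, pvIndent]
        by_cases h2 : def_indent < PySem.Str.len (PySem.List.pyGetD lines i "")
            - PySem.Str.len (PySem.Str.lstrip (PySem.List.pyGetD lines i ""))
        · rw [if_pos h2, if_neg (show ¬(PySem.Str.len (PySem.List.pyGetD lines i "")
            - PySem.Str.len (PySem.Str.lstrip (PySem.List.pyGetD lines i "")) ≤ def_indent) from by omega)]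
          exact pvLoopA_some ..
        · rw [if_neg h2, if_pos (show PySem.Str.len (PySem.List.pyGetD lines i "")
            - PySem.Str.len (PySem.Str.lstrip (PySem.List.pyGetD lines i "")) ≤ def_indent from by omega)]
          simp

-- pvTail computed positionally: the entry of i0 :: firsts just before the first stopper
theorem pvTail_eq_getD (b : Int) (xs : List (Int × Int)) (i0 : Int) :
    pvTail b i0 xs =
      (i0 :: xs.map Prod.fst).getD (xs.findIdx (fun p => decide (p.2 < b))) 0 := by
  induction xs generalizing i0 with
  | nil => rfl
  | cons p rest ih =>
      obtain ⟨j, d⟩ := p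
      simp only [pvTail, List.findIdx_cons, List.map_cons]
      by_cases h : d < b
      · simp [h]
      · simp only [h, if_false, decide_false, cond_false]
        rw [ih j]
        rfl

theorem getD_map_fst (xs : List (Int × Int)) (n : Nat) :
    (xs.map Prod.fst).getD n 0 = (xs.getD n ((0 : Int), (0 : Int))).1 := by
  simp only [List.getD_eq_getElem?_getD, List.getElem?_map]
  cases xs[n]? <;> rfl

theorem pvTail_eq_pyGetD (i0 d0 : Int) (rest : List (Int × Int)) :
    pvTail d0 i0 rest =
      (PySem.List.pyGetD ((i0, d0) :: rest)
        (((((i0, d0) :: rest).findIdx (fun p => decide (p.2 < d0)) : Nat) : Int) - 1)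
        ((0 : Int), (0 : Int))).1 := by
  have hk : ((i0, d0) :: rest).findIdx (fun p => decide (p.2 < d0))
      = rest.findIdx (fun p => decide (p.2 < d0)) + 1 := by
    simp [List.findIdx_cons]
  rw [hk,
    show (((rest.findIdx (fun p => decide (p.2 < d0)) + 1 : Nat) : Int) - 1)
      = ((rest.findIdx (fun p => decide (p.2 < d0)) : Nat) : Int) by push_cast; ring,
    PySem.List.pyGetD_natCast, pvTail_eq_getD, ← getD_map_fst]
  rfl

-- ===== VERDICT (by name: the statement is the Claim_ definition above) =====
theorem find_body_end_indent_spec : Claim_equal_find_body_end_indent := by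
  intro lines start_line _ _
  unfold Spec_find_body_end_indent find_body_end_indent find_body_end_indent_alt
  simp only [pvFbsA_eq_pvFbsB]
  rw [pvLoopA_none]
  rw [show ((PySem.List.pyRange
        (pvFbsB lines start_line (PySem.List.pyRange start_line (lines.length : Int) 1) 0 + 1)
        (lines.length : Int) 1).filter
        (fun i => !(PySem.Str.strip (PySem.List.pyGetD lines i "") == ""))).map
        (fun i => (i, pvIndent (PySem.List.pyGetD lines i "")))
      = pvNB lines (PySem.List.pyRange
        (pvFbsB lines start_line (PySem.List.pyRange start_line (lines.length : Int) 1) 0 + 1)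
        (lines.length : Int) 1) from rfl]
  cases hnb : pvNB lines (PySem.List.pyRange
      (pvFbsB lines start_line (PySem.List.pyRange start_line (lines.length : Int) 1) 0 + 1)
      (lines.length : Int) 1) with
  | nil => rfl
  | cons p rest =>
      obtain ⟨i0, d0⟩ := p
      simp only [pvIndent]
      by_cases h : d0 ≤ PySem.Str.len (PySem.List.pyGetD lines start_line "")
          - PySem.Str.len (PySem.Str.lstrip (PySem.List.pyGetD lines start_line ""))
      · rw [if_pos h, if_pos h]
      · rw [if_neg h, if_neg h]
        have := pvTail_eq_pyGetD i0 d0 rest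
        simpa using this
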